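-- pv_equiv track=rewrite | github.com/MrBrantCode/unitest_baseline | mut_generate/mist_train_taco/taco_11877/solution.py | calculate_evacuation_time
-- ===== SOURCE A (Python) =====
-- def calculate_evacuation_time(R, S, P, A):
--     q = [0] * (R + S + 1)
--     for (i, j) in A:
--         x = S - j if j < S else j - S + 1
--         q[R - 1 - i + x] += 1
--
--     of = 0
--     for i in range(R + S + 1):
--         c = q[i] + of
--         if c > 0:
--             q[i] = 1
--             of = c - 1
--
--     if of > 0:
--         return R + S + 1 + of
--
--     while q and q[-1] == 0:
--         del q[-1]
--
--     return len(q)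
-- ===== SOURCE B (Python) =====
-- def calculate_evacuation_time(R, S, P, A):
--     cnt = [0] * (R + S + 1)
--     for (i, j) in A:
--         cnt[R - 1 - i + (S - j if j < S else j - S + 1)] += 1
--     cur = 0
--     for d, c in enumerate(cnt):
--         if c:
--             cur = max(cur, d) + c
--     return cur
-- ===== Notes on version B (the rewrite author's own statement) =====
-- stated objective: simpler
-- what changed: B keeps A's bucket-count build but replaces A's entire second half - the carry-forward rewrite of the array with an overflow accumulator, the overflow branch, the trailing-zero trim loop and the final len - by a single arithmetic sweep cur = max(cur, d) + c over the buckets.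
import Mathlib
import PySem

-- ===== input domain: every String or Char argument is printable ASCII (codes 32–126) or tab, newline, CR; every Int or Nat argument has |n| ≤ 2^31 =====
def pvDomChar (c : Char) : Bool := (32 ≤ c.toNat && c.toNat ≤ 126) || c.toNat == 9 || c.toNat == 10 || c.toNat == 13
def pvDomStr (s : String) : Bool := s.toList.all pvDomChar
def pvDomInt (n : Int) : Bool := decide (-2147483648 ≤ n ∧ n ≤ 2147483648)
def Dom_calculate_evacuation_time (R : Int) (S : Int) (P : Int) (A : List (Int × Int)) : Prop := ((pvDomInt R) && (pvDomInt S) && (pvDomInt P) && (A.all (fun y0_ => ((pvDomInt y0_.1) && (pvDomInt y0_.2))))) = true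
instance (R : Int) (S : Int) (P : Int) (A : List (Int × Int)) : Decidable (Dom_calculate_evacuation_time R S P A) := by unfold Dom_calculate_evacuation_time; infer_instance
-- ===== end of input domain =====

-- B keeps A's bucket-count build but replaces A's whole second half — the carry-forward
-- rewrite of the array, the overflow branch, the trailing-zero trim and the final len —
-- by one arithmetic sweep cur = max(cur, d) + c over the buckets (objective: simpler).


-- ===== PORT A =====
-- `while q and q[-1] == 0: del q[-1]`
def pvTrimA (fuel : Nat) (q : List Int) : List Int :=
  match fuel with
  | 0 => q
  | fuel + 1 =>
      if q ≠ [] ∧ PySem.List.pyGet? q (-1) = some 0 then pvTrimA fuel q.dropLast else q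

def calculate_evacuation_time (R : Int) (S : Int) (P : Int) (A : List (Int × Int)) : Int :=
  -- q = [0] * (R + S + 1); for (i, j) in A: x = …; q[R-1-i+x] += 1
  -- (an index out of Python's wrap range is an IndexError: those inputs are outside Pre_,
  --  and there the total pySetD/pyGetD forms leave q unchanged)
  let q0 : List Int := List.replicate (R + S + 1).toNat 0
  let q1 := A.foldl (fun q p =>
    let x := if p.2 < S then S - p.2 else p.2 - S + 1
    PySem.List.pySetD q (R - 1 - p.1 + x) (PySem.List.pyGetD q (R - 1 - p.1 + x) 0 + 1)) q0
  -- of = 0; for i in range(R+S+1): c = q[i] + of; if c > 0: q[i] = 1; of = c - 1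
  let st := (PySem.List.pyRange 0 (R + S + 1) 1).foldl
    (fun (st : List Int × Int) i =>
      let c := PySem.List.pyGetD st.1 i 0 + st.2
      if c > 0 then (PySem.List.pySetD st.1 i 1, c - 1) else st) (q1, 0)
  if st.2 > 0 then R + S + 1 + st.2
  else ((pvTrimA st.1.length st.1).length : Int)

-- ===== PORT B =====
def calculate_evacuation_time_alt (R : Int) (S : Int) (P : Int) (A : List (Int × Int)) : Int :=
  -- cnt = [0] * (R + S + 1); for (i, j) in A: cnt[R-1-i+(…)] += 1   (same bucket build as A)
  let cnt0 : List Int := List.replicate (R + S + 1).toNat 0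
  let cnt := A.foldl (fun q p =>
    let x := if p.2 < S then S - p.2 else p.2 - S + 1
    PySem.List.pySetD q (R - 1 - p.1 + x) (PySem.List.pyGetD q (R - 1 - p.1 + x) 0 + 1)) cnt0
  -- cur = 0; for d, c in enumerate(cnt): if c: cur = max(cur, d) + c; return cur
  (PySem.List.enumerate cnt 0).foldl
    (fun cur dc => if dc.2 ≠ 0 then max cur dc.1 + dc.2 else cur) 0

-- ===== PRECONDITION & SPEC =====
-- Pre_ is exactly the inputs on which A's `q[R-1-i+x] += 1` never raises IndexError, i.e.
-- every arrival slot lies inside Python's wrap range of the queue of length max(R+S+1, 0),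
-- written as plain linear inequalities on each pair (i, j) of A.  B raises there too.
def Pre_calculate_evacuation_time (R : Int) (S : Int) (P : Int) (A : List (Int × Int)) : Prop :=
  ∀ p ∈ A,
    (p.2 < S → R + S ≤ ((R + S + 1).toNat : Int) + p.1 + p.2
             ∧ p.1 + p.2 < R + S + ((R + S + 1).toNat : Int)) ∧
    (S ≤ p.2 → S + p.1 ≤ R + p.2 + ((R + S + 1).toNat : Int)
             ∧ R + p.2 < S + p.1 + ((R + S + 1).toNat : Int))

instance (R : Int) (S : Int) (P : Int) (A : List (Int × Int)) : Decidable (Pre_calculate_evacuation_time R S P A) := by unfold Pre_calculate_evacuation_time; infer_instance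

def pvWitness_calculate_evacuation_time : Int × Int × Int × (List (Int × Int)) := (5, 5, 3, [(0, 0), (1, 2), (2, 7), (4, 4)])

def Spec_calculate_evacuation_time (R : Int) (S : Int) (P : Int) (A : List (Int × Int)) (out : Int) : Prop := out = calculate_evacuation_time_alt R S P A
instance (R : Int) (S : Int) (P : Int) (A : List (Int × Int)) (out : Int) : Decidable (Spec_calculate_evacuation_time R S P A out) := by unfold Spec_calculate_evacuation_time; infer_instance

-- ===== CLAIM (what is proved, stated in full; the proofs are below) =====
def Claim_equal_calculate_evacuation_time : Prop := ∀ (R : Int) (S : Int) (P : Int) (A : List (Int × Int)), Dom_calculate_evacuation_time R S P A → Pre_calculate_evacuation_time R S P A → Spec_calculate_evacuation_time R S P A (calculate_evacuation_time R S P A)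

-- ===== LEMMAS AND PROOFS =====

-- the sweep over a list of slots, as a reusable function of the start value
def pvSweep (cur : Int) (l : List Int) : Int := l.foldl (fun cur a => max cur a + 1) cur

-- B's answer on the first m buckets of a count function
def pvW (cnt : Nat → Nat) (m : Nat) : Int :=
  pvSweep 0 ((List.range m).flatMap (fun k => List.replicate (cnt k) ((k : Nat) : Int)))

-- the body of A's carry-forward loop
def pvStep (st : List Int × Int) (i : Int) : List Int × Int :=
  let c := PySem.List.pyGetD st.1 i 0 + st.2
  if c > 0 then (PySem.List.pySetD st.1 i 1, c - 1) else st

lemma pvSweep_append (cur : Int) (l1 l2 : List Int) :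
    pvSweep cur (l1 ++ l2) = pvSweep (pvSweep cur l1) l2 := by
  simp [pvSweep, List.foldl_append]

lemma pvSweep_replicate_lt (c : Nat) : ∀ (cur v : Int), v < cur →
    pvSweep cur (List.replicate c v) = cur + c := by
  induction c with
  | zero => intro cur v _; simp [pvSweep]
  | succ c ih =>
      intro cur v hv
      have : max cur v = cur := max_eq_left hv.le
      simp only [List.replicate_succ, pvSweep, List.foldl_cons] at *
      rw [this]
      have := ih (cur + 1) v (by omega)
      simp [pvSweep] at this
      rw [this]; push_cast; ring

lemma pvSweep_replicate (c : Nat) (cur v : Int) :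
    pvSweep cur (List.replicate c v) = if c = 0 then cur else max cur v + c := by
  cases c with
  | zero => simp [pvSweep]
  | succ c =>
      simp only [List.replicate_succ, pvSweep, List.foldl_cons]
      have := pvSweep_replicate_lt c (max cur v + 1) v (by omega)
      simp [pvSweep] at this
      rw [this]; simp; push_cast; ring

lemma pvW_succ (cnt : Nat → Nat) (m : Nat) :
    pvW cnt (m + 1) = pvSweep (pvW cnt m) (List.replicate (cnt m) ((m : Nat) : Int)) := by
  simp [pvW, List.range_succ, pvSweep_append]

lemma pv_getD_set_self (q : List Int) (i : Nat) (v : Int) (h : i < q.length) :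
    (q.set i v).getD i 0 = v := by
  simp [List.getD_eq_getElem?_getD, h]

lemma pv_getD_set_ne (q : List Int) (i k : Nat) (v : Int) (h : i ≠ k) :
    (q.set i v).getD k 0 = q.getD k 0 := by
  simp [List.getD_eq_getElem?_getD, List.getElem?_set, h]

-- members of q after one `q[i] += 1` step (any index, incl. the wrapped negative ones)
lemma pv_mem_pySetD {x v : Int} (q : List Int) (i : Int)
    (h : x ∈ PySem.List.pySetD q i v) : x ∈ q ∨ x = v := by
  simp only [PySem.List.pySetD, PySem.List.pySet?] at h
  cases hk : PySem.List.pyIdx? q.length i with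
  | none => rw [hk] at h; simp at h; exact Or.inl h
  | some k =>
      rw [hk] at h; simp at h
      exact List.mem_or_eq_of_mem_set h

lemma pv_pyGetD_nonneg (q : List Int) (hq : ∀ x ∈ q, 0 ≤ x) (i : Int) :
    0 ≤ PySem.List.pyGetD q i 0 := by
  by_cases hI : PySem.Raise.InRange q.length i
  · exact hq _ (PySem.List.pyGetD_mem q 0 hI)
  · have hn : PySem.List.pyGet? q i = none := by
      rw [PySem.List.pyGet?_eq_none_iff]; exact hI
    simp [PySem.List.pyGetD, hn]

-- every entry of the bucket array built by the shared loop is nonnegative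
lemma pv_build_nonneg (R : Int) (S : Int) (l : List (Int × Int)) : ∀ (q : List Int),
    (∀ x ∈ q, 0 ≤ x) →
    ∀ x ∈ l.foldl (fun q p =>
        let x := if p.2 < S then S - p.2 else p.2 - S + 1
        PySem.List.pySetD q (R - 1 - p.1 + x) (PySem.List.pyGetD q (R - 1 - p.1 + x) 0 + 1)) q,
      0 ≤ x := by
  induction l with
  | nil => intro q hq x hx; exact hq x hx
  | cons p t ih =>
      intro q hq
      simp only [List.foldl_cons]
      apply ih
      intro x hx
      rcases pv_mem_pySetD q _ hx with h | rfl
      · exact hq x h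
      · have := pv_pyGetD_nonneg q hq (R - 1 - p.1 + (if p.2 < S then S - p.2 else p.2 - S + 1))
        omega

-- the shared build loop preserves the length of the bucket array
lemma pv_build_length (R : Int) (S : Int) (l : List (Int × Int)) : ∀ (q : List Int),
    (l.foldl (fun q p =>
        let x := if p.2 < S then S - p.2 else p.2 - S + 1
        PySem.List.pySetD q (R - 1 - p.1 + x) (PySem.List.pyGetD q (R - 1 - p.1 + x) 0 + 1)) q).length
      = q.length := by
  induction l with
  | nil => intro q; rfl
  | cons p t ih =>
      intro q
      simp only [List.foldl_cons]
      rw [ih, PySem.List.length_pySetD]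

lemma pv_getD_nonneg (q : List Int) (hq : ∀ x ∈ q, 0 ≤ x) (k : Nat) : 0 ≤ q.getD k 0 := by
  rcases Nat.lt_or_ge k q.length with h | h
  · rw [List.getD_eq_getElem?_getD, List.getElem?_eq_getElem h]
    exact hq _ (List.getElem_mem h)
  · rw [List.getD_eq_getElem?_getD, List.getElem?_eq_none (by omega)]
    simp

-- B's enumerate sweep equals the slot-multiset sweep, bucket by bucket
lemma pv_enum_fold (q : List Int) : ∀ (s : Nat) (cur : Int), (∀ x ∈ q, 0 ≤ x) →
    (PySem.List.enumerate q ((s : Nat) : Int)).foldl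
      (fun cur dc => if dc.2 ≠ 0 then max cur dc.1 + dc.2 else cur) cur
    = pvSweep cur ((List.range q.length).flatMap
        (fun k => List.replicate (q.getD k 0).toNat (((s + k : Nat)) : Int))) := by
  induction q with
  | nil => intro s cur _; simp [PySem.List.enumerate_nil, pvSweep]
  | cons c t ih =>
      intro s cur hq
      have hc0 : 0 ≤ c := hq c List.mem_cons_self
      have h1 : PySem.List.enumerate (c :: t) ((s : Nat) : Int)
          = (((s : Nat) : Int), c) :: PySem.List.enumerate t (((s + 1 : Nat)) : Int) := by
        rw [PySem.List.enumerate_cons]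
        norm_num
      have h2 : (List.range (c :: t).length).flatMap
            (fun k => List.replicate ((c :: t).getD k 0).toNat (((s + k : Nat)) : Int))
          = List.replicate c.toNat ((s : Nat) : Int)
            ++ (List.range t.length).flatMap
                (fun k => List.replicate (t.getD k 0).toNat ((((s + 1) + k : Nat)) : Int)) := by
        rw [List.length_cons, List.range_succ_eq_map, List.flatMap_cons, List.flatMap_map]
        congr 1
        exact congrArg (fun f => List.flatMap f (List.range t.length)) (funext fun a => by
          congr 1
          omega)
      rw [h1, List.foldl_cons, h2, pvSweep_append,
          ih (s + 1) _ (fun x hx => hq x (List.mem_cons_of_mem _ hx))]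
      congr 1
      show (if c ≠ 0 then max cur ((s : Nat) : Int) + c else cur)
        = pvSweep cur (List.replicate c.toNat ((s : Nat) : Int))
      rw [pvSweep_replicate]
      by_cases hc : c = 0
      · simp [hc]
      · rw [if_pos hc, if_neg (by omega), Int.toNat_of_nonneg hc0]

-- the invariant carried through A's carry-forward scan, against the bucket counts
def pvInv (cnt : Nat → Nat) (n m : Nat) (st : List Int × Int) : Prop :=
  st.1.length = n ∧ 0 ≤ st.2 ∧
  (∀ k : Nat, m ≤ k → k < n → st.1.getD k 0 = (cnt k : Int)) ∧
  ( (0 < st.2 ∧ pvW cnt m = (m : Int) + st.2)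
  ∨ (st.2 = 0 ∧ pvW cnt m = 0 ∧ ∀ k : Nat, k < m → st.1.getD k 0 = 0)
  ∨ (st.2 = 0 ∧ ∃ t : Nat, t < m
      ∧ pvW cnt m = (t : Int) + 1
      ∧ st.1.getD t 0 = 1
      ∧ ∀ k : Nat, t < k → k < m → st.1.getD k 0 = 0) )

lemma pv_scan (cnt : Nat → Nat) (n : Nat) (q1 : List Int)
    (hlen : q1.length = n)
    (hcnt : ∀ k : Nat, k < n → q1.getD k 0 = (cnt k : Int)) :
    ∀ m : Nat, m ≤ n →
      pvInv cnt n m ((PySem.List.pyRange 0 (m : Int) 1).foldl pvStep (q1, 0)) := by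
  intro m
  induction m with
  | zero =>
      intro _
      rw [show ((0 : Nat) : Int) = 0 by rfl, PySem.List.pyRange_one_eq_nil le_rfl]
      refine ⟨hlen, le_rfl, fun k _ hk => hcnt k hk, Or.inr (Or.inl ⟨rfl, ?_, ?_⟩)⟩
      · simp [pvW, pvSweep]
      · intro k hk; omega
  | succ m ih =>
      intro hm1
      have hmn : m < n := by omega
      obtain ⟨hL, hof, hK, hD⟩ := ih (by omega)
      set st := (PySem.List.pyRange 0 (m : Int) 1).foldl pvStep (q1, 0) with hst
      have hrange : PySem.List.pyRange 0 ((m + 1 : Nat) : Int) 1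
          = PySem.List.pyRange 0 (m : Int) 1 ++ [(m : Int)] := by
        rw [show ((m + 1 : Nat) : Int) = (m : Int) + 1 by push_cast; ring]
        exact PySem.List.pyRange_one_succ_right (by positivity)
      rw [hrange, List.foldl_append, List.foldl_cons, List.foldl_nil, ← hst]
      -- the m-th entry of the queue is the count of slot m
      have hqm : PySem.List.pyGetD st.1 (m : Int) 0 = (cnt m : Int) := by
        rw [PySem.List.pyGetD_natCast]
        exact hK m le_rfl hmn
      -- B's answer on the first m+1 buckets, from the one on the first m
      have hsw : pvW cnt (m + 1)
          = pvSweep (pvW cnt m) (List.replicate (cnt m) ((m : Nat) : Int)) := pvW_succ cnt m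
      set w := pvW cnt m with hw
      simp only [pvStep, hqm]
      by_cases hc : ((cnt m : Int) + st.2 > 0)
      · rw [if_pos hc]
        have hL' : (PySem.List.pySetD st.1 (m : Int) 1).length = n := by
          rw [PySem.List.pySetD_natCast]; simp [hL]
        refine ⟨hL', by omega, ?_, ?_⟩
        · intro k hk1 hk2
          rw [PySem.List.pySetD_natCast, pv_getD_set_ne st.1 m k 1 (by omega)]
          exact hK k (by omega) hk2
        · -- the disjunction
          rcases hD with ⟨hpos2, hsweq⟩ | ⟨hz, hsweq, _⟩ | ⟨hz, t, htm, hsweq, _, _⟩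
          · -- carrying: w = m + of > m
            have hmax : max w (m : Int) = w := by rw [hsweq]; omega
            have hsw1 : pvW cnt (m + 1) = (m : Int) + st.2 + cnt m := by
              rw [hsw, pvSweep_replicate]
              by_cases h0 : cnt m = 0
              · simp [h0, hsweq]
              · rw [if_neg h0, hmax, hsweq]
            by_cases hof1 : (0 : Int) < (cnt m : Int) + st.2 - 1
            · exact Or.inl ⟨hof1, by rw [hsw1]; push_cast; ring⟩
            · refine Or.inr (Or.inr ⟨by omega, m, by omega, ?_, ?_, by intro k hk1 hk2; omega⟩)
              · rw [hsw1]; push_cast; omega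
              · rw [PySem.List.pySetD_natCast]
                exact pv_getD_set_self st.1 m 1 (by omega)
          · -- idle, all zeros so far: w = 0, of = 0, cnt m > 0
            have hcnt1 : (1 : Int) ≤ (cnt m : Int) := by omega
            have hsw1 : pvW cnt (m + 1) = (m : Int) + cnt m := by
              rw [hsw, pvSweep_replicate, if_neg (by omega), hsweq]
              omega
            by_cases hof1 : (0 : Int) < (cnt m : Int) + st.2 - 1
            · exact Or.inl ⟨hof1, by rw [hsw1]; push_cast; omega⟩
            · refine Or.inr (Or.inr ⟨by omega, m, by omega, ?_, ?_, by intro k hk1 hk2; omega⟩)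
              · rw [hsw1]; push_cast; omega
              · rw [PySem.List.pySetD_natCast]
                exact pv_getD_set_self st.1 m 1 (by omega)
          · -- idle after a busy block ending at t: w = t + 1 ≤ m
            have hcnt1 : (1 : Int) ≤ (cnt m : Int) := by omega
            have hwle : w ≤ (m : Int) := by rw [hsweq]; push_cast; omega
            have hsw1 : pvW cnt (m + 1) = (m : Int) + cnt m := by
              rw [hsw, pvSweep_replicate, if_neg (by omega)]
              omega
            by_cases hof1 : (0 : Int) < (cnt m : Int) + st.2 - 1
            · exact Or.inl ⟨hof1, by rw [hsw1]; push_cast; omega⟩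
            · refine Or.inr (Or.inr ⟨by omega, m, by omega, ?_, ?_, by intro k hk1 hk2; omega⟩)
              · rw [hsw1]; push_cast; omega
              · rw [PySem.List.pySetD_natCast]
                exact pv_getD_set_self st.1 m 1 (by omega)
      · rw [if_neg hc]
        have hcz : (cnt m : Int) = 0 ∧ st.2 = 0 := by omega
        have hswid : pvW cnt (m + 1) = w := by
          rw [hsw, show cnt m = 0 by exact_mod_cast hcz.1]
          simp [pvSweep]
        refine ⟨hL, hof, fun k hk1 hk2 => hK k (by omega) hk2, ?_⟩
        rcases hD with ⟨hpos2, _⟩ | ⟨hz, hsweq, hzs⟩ | ⟨hz, t, htm, hsweq, h1, hzs⟩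
        · omega
        · refine Or.inr (Or.inl ⟨hz, by rw [hswid, hsweq], ?_⟩)
          intro k hk
          rcases Nat.lt_or_ge k m with h | h
          · exact hzs k h
          · have : k = m := by omega
            subst this
            rw [hK k le_rfl hmn]
            exact_mod_cast hcz.1
        · refine Or.inr (Or.inr ⟨hz, t, by omega, by rw [hswid, hsweq], h1, ?_⟩)
          intro k hk1 hk2
          rcases Nat.lt_or_ge k m with h | h
          · exact hzs k hk1 h
          · have : k = m := by omega
            subst this
            rw [hK k le_rfl hmn]
            exact_mod_cast hcz.1

-- trailing-zero trim lemmas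
lemma pvTrimA_nil (f : Nat) : pvTrimA f [] = [] := by cases f <;> simp [pvTrimA]

lemma pvTrimA_concat_zero (f : Nat) (q : List Int) :
    pvTrimA (f + 1) (q ++ [(0 : Int)]) = pvTrimA f q := by
  rw [pvTrimA]
  simp [PySem.List.pyGet?_neg_one_append_singleton, List.dropLast_concat]

lemma pvTrimA_concat_ne (f : Nat) (q : List Int) (x : Int) (hx : x ≠ 0) :
    pvTrimA f (q ++ [x]) = q ++ [x] := by
  cases f with
  | zero => rfl
  | succ f =>
      rw [pvTrimA]
      simp [PySem.List.pyGet?_neg_one_append_singleton, hx]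

lemma pvTrimA_all_zero (q : List Int) (h : ∀ k : Nat, k < q.length → q.getD k 0 = 0) :
    pvTrimA q.length q = [] := by
  induction q using List.reverseRecOn with
  | nil => exact pvTrimA_nil 0
  | append_singleton q x ih =>
      have hx : x = 0 := by
        have := h q.length (by simp)
        simpa [List.getD_eq_getElem?_getD, List.getElem?_append_right] using this
      subst hx
      rw [show (q ++ [(0:Int)]).length = q.length + 1 by simp, pvTrimA_concat_zero]
      exact ih (fun k hk => by
        have := h k (by simp; omega)
        rwa [List.getD_append _ _ _ _ hk] at this)

lemma pvTrimA_last_one (q : List Int) : ∀ (t : Nat), t < q.length → q.getD t 0 = 1 →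
    (∀ k : Nat, t < k → k < q.length → q.getD k 0 = 0) →
    ((pvTrimA q.length q).length : Int) = (t : Int) + 1 := by
  induction q using List.reverseRecOn with
  | nil => intro t ht; simp at ht
  | append_singleton q x ih =>
      intro t ht h1 hz
      rcases Nat.lt_or_ge t q.length with htq | htq
      · have hx : x = 0 := by
          have := hz q.length (by omega) (by simp)
          simpa [List.getD_eq_getElem?_getD, List.getElem?_append_right] using this
        subst hx
        rw [show (q ++ [(0:Int)]).length = q.length + 1 by simp, pvTrimA_concat_zero]
        exact ih t htq (by rwa [List.getD_append _ _ _ _ htq] at h1)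
          (fun k hk1 hk2 => by
            have := hz k hk1 (by simp; omega)
            rwa [List.getD_append _ _ _ _ hk2] at this)
      · have ht' : t = q.length := by simp at ht; omega
        subst ht'
        have hx : x = 1 := by
          simpa [List.getD_eq_getElem?_getD, List.getElem?_append_right] using h1
        subst hx
        rw [pvTrimA_concat_ne _ q 1 one_ne_zero]
        simp

lemma pv_main (R : Int) (S : Int) (P : Int) (A : List (Int × Int))
    (hpre : Pre_calculate_evacuation_time R S P A) :
    calculate_evacuation_time R S P A = calculate_evacuation_time_alt R S P A := by
  unfold Pre_calculate_evacuation_time at hpre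
  rcases lt_or_ge (R + S + 1) 0 with hneg | hL
  · -- R+S+1 < 0: the bucket array is empty, Pre_ forces A = []
    have hmax : ((R + S + 1).toNat : Int) = 0 := by
      simp [Int.toNat_of_nonpos (le_of_lt hneg)]
    have hA0 : A = [] := by
      cases A with
      | nil => rfl
      | cons p t =>
          exfalso
          have h1 := hpre p List.mem_cons_self
          rw [hmax] at h1
          rcases lt_or_ge p.2 S with hj | hj
          · have := h1.1 hj; omega
          · have := h1.2 hj; omega
    subst hA0
    simp only [calculate_evacuation_time, calculate_evacuation_time_alt, List.foldl_nil]
    rw [PySem.List.pyRange_one_eq_nil (by omega),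
        show (R + S + 1).toNat = 0 from Int.toNat_of_nonpos (by omega)]
    norm_num [pvTrimA, PySem.List.enumerate_nil]
  · -- main case: 0 ≤ R+S+1
    set n : Nat := (R + S + 1).toNat with hndef
    have hLn : ((n : Nat) : Int) = R + S + 1 := Int.toNat_of_nonneg hL
    -- the bucket array both programs build (the same fold on both sides)
    set q1 := A.foldl (fun q p =>
      let x := if p.2 < S then S - p.2 else p.2 - S + 1
      PySem.List.pySetD q (R - 1 - p.1 + x) (PySem.List.pyGetD q (R - 1 - p.1 + x) 0 + 1))
      (List.replicate (R + S + 1).toNat (0 : Int)) with hq1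
    have hq1len : q1.length = n := by
      rw [hq1, pv_build_length, List.length_replicate]
    have hq1mem : ∀ x ∈ q1, 0 ≤ x := by
      rw [hq1]
      exact pv_build_nonneg R S A _ (fun x hx => by
        rw [List.eq_of_mem_replicate hx])
    set cnt : Nat → Nat := fun k => (q1.getD k 0).toNat with hcntdef
    have hcnt : ∀ k : Nat, k < n → q1.getD k 0 = (cnt k : Int) := by
      intro k _
      rw [hcntdef, Int.toNat_of_nonneg (pv_getD_nonneg q1 hq1mem k)]
    -- B's port computes pvW cnt n
    have hB : calculate_evacuation_time_alt R S P A = pvW cnt n := by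
      show (PySem.List.enumerate q1 0).foldl
        (fun cur dc => if dc.2 ≠ 0 then max cur dc.1 + dc.2 else cur) 0 = pvW cnt n
      rw [show PySem.List.enumerate q1 (0 : Int)
            = PySem.List.enumerate q1 (((0 : Nat)) : Int) by norm_num,
          pv_enum_fold q1 0 0 hq1mem, hq1len]
      simp [pvW, hcntdef]
    -- A's port: the carry-forward scan, by the invariant
    have hA : calculate_evacuation_time R S P A
        = (let st := (PySem.List.pyRange 0 (R + S + 1) 1).foldl pvStep (q1, 0)
           if st.2 > 0 then R + S + 1 + st.2
           else ((pvTrimA st.1.length st.1).length : Int)) := rfl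
    rw [hA, hB]
    have hrange : PySem.List.pyRange 0 (R + S + 1) 1 = PySem.List.pyRange 0 ((n : Nat) : Int) 1 := by
      rw [hLn]
    rw [hrange]
    obtain ⟨hstlen, hof, _, hD⟩ := pv_scan cnt n q1 hq1len hcnt n le_rfl
    set st := (PySem.List.pyRange 0 ((n : Nat) : Int) 1).foldl pvStep (q1, 0) with hst
    rcases hD with ⟨hofpos, hsweq⟩ | ⟨hz, hsweq, hzs⟩ | ⟨hz, t, htn, hsweq, h1, hzs⟩
    · simp only [if_pos hofpos, hsweq]
      omega
    · rw [if_neg (by omega)]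
      rw [pvTrimA_all_zero st.1 (fun k hk => hzs k (by rwa [hstlen] at hk))]
      simp [hsweq]
    · rw [if_neg (by omega)]
      rw [pvTrimA_last_one st.1 t (by omega) h1
        (fun k hk1 hk2 => hzs k hk1 (by rwa [hstlen] at hk2)), hsweq]

-- ===== VERDICT (by name: the statement is the Claim_ definition above) =====
theorem calculate_evacuation_time_spec : Claim_equal_calculate_evacuation_time := by
  intro R S P A _ hpre
  unfold Spec_calculate_evacuation_time
  exact pv_main R S P A hpre
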